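-- pv_equiv track=rewrite | github.com/sarthak77/Undo-Logging | 20171091_2.py | findckpt
-- ===== SOURCE A (Python) =====
-- def findckpt(T):
--     """
--     Return latest ckpt index
--     """
--
--     start=len(T)
--     end=len(T)
--     for i in range(len(T)):
--         log=T[i]
--         if(log[1]=="CKPT"):
--             start=i
--         if(log[0]=="END"):
--             end=i
--
--     start=len(T)-1-start
--     end=len(T)-1-end
--
--     return [start,end]
-- ===== SOURCE B (Python) =====
-- def findckpt(T):
--     """
--     Return latest ckpt index
--     """
--     def back_index(R, pos, key):
--         # first match scanning the reversed list; -1 if absent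
--         for j, row in enumerate(R):
--             if row[pos] == key:
--                 return j
--         return -1
--
--     R = list(reversed(T))
--     return [back_index(R, 1, "CKPT"), back_index(R, 0, "END")]
-- ===== Notes on version B (the rewrite author's own statement) =====
-- stated objective: simpler
-- what changed: Replaces the forward accumulating pass (keep last match, then convert with len-1-i) by a short-circuiting backward search: reverse the list and return the index of the first match, -1 if absent, so no conversion arithmetic and no overwritten accumulators.
import Mathlib
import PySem

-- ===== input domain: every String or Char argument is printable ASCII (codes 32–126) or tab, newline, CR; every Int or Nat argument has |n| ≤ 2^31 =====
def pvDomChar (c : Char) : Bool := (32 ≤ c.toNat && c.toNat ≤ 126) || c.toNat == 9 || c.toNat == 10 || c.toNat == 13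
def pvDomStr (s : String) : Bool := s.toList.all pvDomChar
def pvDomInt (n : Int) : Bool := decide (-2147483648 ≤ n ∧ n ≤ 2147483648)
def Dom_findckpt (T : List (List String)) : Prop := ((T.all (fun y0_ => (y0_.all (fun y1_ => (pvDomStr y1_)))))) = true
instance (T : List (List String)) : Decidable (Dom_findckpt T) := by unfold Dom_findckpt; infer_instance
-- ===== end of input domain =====

-- B changes the algorithm shape only (backward first-match search instead of a
-- forward accumulating pass); return values agree on all inputs A accepts.

-- ===== PORT A =====
-- the loop `for i in range(len(T)): ...` carrying the two accumulators start, end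
-- (log[1]/log[0] read with getD ""; inside Pre_ every row has ≥ 2 entries, so this
-- is exactly Python's in-range indexing — out of range Python raises, excluded by Pre_)
def findckptLoop (T : List (List String)) (i : Nat) (s e : Int) : Int × Int :=
  match T with
  | [] => (s, e)
  | log :: rest =>
      findckptLoop rest (i + 1)
        (if log.getD 1 "" == "CKPT" then (i : Int) else s)
        (if log.getD 0 "" == "END" then (i : Int) else e)

def findckpt (T : List (List String)) : List Int :=
  let n : Int := (T.length : Int)
  let p := findckptLoop T 0 n n
  [n - 1 - p.1, n - 1 - p.2]

-- ===== PORT B =====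
-- back_index: index of the first matching row in the (already reversed) list, -1 if none
def backIndex (pos : Nat) (key : String) : List (List String) → Int
  | [] => -1
  | row :: rest =>
      if row.getD pos "" == key then 0
      else if backIndex pos key rest = -1 then -1 else backIndex pos key rest + 1

def findckpt_alt (T : List (List String)) : List Int :=
  let R := T.reverse
  [backIndex 1 "CKPT" R, backIndex 0 "END" R]

-- ===== PRECONDITION & SPEC =====
-- A indexes log[1] and log[0] on every row: rows shorter than 2 make Python raise IndexError.
def Pre_findckpt (T : List (List String)) : Prop := ∀ r ∈ T, 2 ≤ r.length
instance (T : List (List String)) : Decidable (Pre_findckpt T) := by unfold Pre_findckpt; infer_instance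
def pvWitness_findckpt : List (List String) := [["BEGIN", "CKPT"], ["END", "x"]]

def Spec_findckpt (T : List (List String)) (out : List Int) : Prop := out = findckpt_alt T
instance (T : List (List String)) (out : List Int) : Decidable (Spec_findckpt T out) := by unfold Spec_findckpt; infer_instance

-- ===== CLAIM (what is proved, stated in full; the proofs are below) =====
def Claim_equal_findckpt : Prop := ∀ (T : List (List String)), Dom_findckpt T → Pre_findckpt T → Spec_findckpt T (findckpt T)

-- ===== LEMMAS AND PROOFS =====

-- one accumulator of the pair loop, isolated
def pvFold (m : List String → Bool) : List (List String) → Nat → Int → Int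
  | [], _, s => s
  | r :: rs, j, s => pvFold m rs (j + 1) (if m r then (j : Int) else s)

-- backIndex, parameterised by the row predicate
def pvFM (m : List String → Bool) : List (List String) → Int
  | [] => -1
  | r :: rs => if m r then 0 else if pvFM m rs = -1 then -1 else pvFM m rs + 1

theorem backIndex_eq_pvFM (pos : Nat) (key : String) (l : List (List String)) :
    backIndex pos key l = pvFM (fun r => r.getD pos "" == key) l := by
  induction l with
  | nil => rfl
  | cons r rs ih => simp [backIndex, pvFM, ih]

theorem findckptLoop_eq_pvFold (T : List (List String)) (i : Nat) (s e : Int) :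
    findckptLoop T i s e =
      (pvFold (fun r => r.getD 1 "" == "CKPT") T i s,
       pvFold (fun r => r.getD 0 "" == "END") T i e) := by
  induction T generalizing i s e with
  | nil => rfl
  | cons r rs ih => simp [findckptLoop, pvFold, ih]

-- the fold either returns its init or a genuine index in [j, j + len)
theorem pvFold_range (m : List String → Bool) (l : List (List String)) :
    ∀ (j : Nat) (s : Int),
      pvFold m l j s = s ∨ ((j : Int) ≤ pvFold m l j s ∧ pvFold m l j s < (j : Int) + l.length) := by
  induction l with
  | nil => intro j s; exact Or.inl rfl
  | cons r rs ih =>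
      intro j s
      simp only [pvFold]
      by_cases h : m r
      · right
        rcases ih (j + 1) (j : Int) with h1 | h1 <;>
          · simp only [h, if_true, List.length_cons] at *; push_cast at *; omega
      · simp only [h, Bool.false_eq_true, if_false]
        rcases ih (j + 1) s with h1 | h1
        · exact Or.inl h1
        · right; simp only [List.length_cons]; push_cast at h1 ⊢; omega

-- the init matters only when nothing matched
theorem pvFold_init (m : List String → Bool) (l : List (List String)) :
    ∀ (j : Nat) (s t : Int),
      pvFold m l j s = pvFold m l j t ∨ (pvFold m l j s = s ∧ pvFold m l j t = t) := by
  induction l with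
  | nil => intro j s t; exact Or.inr ⟨rfl, rfl⟩
  | cons r rs ih =>
      intro j s t
      simp only [pvFold]
      by_cases h : m r
      · simp [h]
      · simp only [h, Bool.false_eq_true, if_false]; exact ih (j + 1) s t

theorem pvFold_snoc (m : List String → Bool) (l : List (List String)) :
    ∀ (r : List String) (j : Nat) (s : Int),
      pvFold m (l ++ [r]) j s =
        (if m r then ((j : Int) + l.length) else pvFold m l j s) := by
  induction l with
  | nil => intro r j s; simp [pvFold]
  | cons a as ih =>
      intro r j s
      simp only [List.cons_append, pvFold, ih, List.length_cons]
      push_cast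
      split_ifs <;> omega

-- the core correspondence: first match in the reverse = len-1-(last match forward)
theorem pvFM_reverse (m : List String → Bool) (l : List (List String)) :
    ∀ (j : Nat),
      pvFM m l.reverse = ((j : Int) + l.length) - 1 - pvFold m l j ((j : Int) + l.length) := by
  induction l using List.reverseRecOn with
  | nil => intro j; simp [pvFM, pvFold]
  | append_singleton as r ih =>
      intro j
      rw [List.reverse_append]
      simp only [List.reverse_cons, List.reverse_nil, List.nil_append, List.singleton_append]
      rw [pvFold_snoc]
      simp only [pvFM, List.length_append, List.length_cons, List.length_nil]
      push_cast
      have hIH := ih j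
      by_cases h : m r
      · simp only [h, if_true]; omega
      · simp only [h, Bool.false_eq_true, if_false]
        have hin := pvFold_init m as j ((j : Int) + ((as.length : Int) + 1)) ((j : Int) + (as.length : Int))
        have hr := pvFold_range m as j ((j : Int) + (as.length : Int))
        have hr' := pvFold_range m as j ((j : Int) + ((as.length : Int) + 1))
        split_ifs with hc <;> omega

theorem findckpt_eq_alt (T : List (List String)) : findckpt T = findckpt_alt T := by
  have h1 := pvFM_reverse (fun r => r.getD 1 "" == "CKPT") T 0
  have h2 := pvFM_reverse (fun r => r.getD 0 "" == "END") T 0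
  simp only [Nat.cast_zero, zero_add, List.getD] at h1 h2
  simp [findckpt, findckpt_alt, findckptLoop_eq_pvFold, backIndex_eq_pvFM, List.getD]
  exact ⟨h1.symm, h2.symm⟩

-- ===== VERDICT (by name: the statement is the Claim_ definition above) =====
theorem findckpt_spec : Claim_equal_findckpt := by
  intro T _ _
  exact findckpt_eq_alt T
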